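-- pv_equiv track=rewrite | github.com/ZhangBohan233/SPL | bin/spl_lib.py | replace_bool_none
-- ===== SOURCE A (Python) =====
-- def replace_bool_none(string: str):
--     """
--     Returns a str with 'None', 'True', and 'False' replaced with 'null', 'true', and 'false'.
--
--     This function also removes quotes generated by spl String object.
--
--     :param string: the str object to be replaced
--     :return: a str with 'None', 'True', and 'False' replaced with 'null', 'true', and 'false'
--     """
--     in_single = False
--     in_double = False
--     lst = []
--     i = 0
--     while i < len(string):
--         ch = string[i]
--         if in_single:
--             if ch == "'":
--                 in_single = False
--                 i += 1
--                 continue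
--         elif in_double:
--             if ch == '"':
--                 in_double = False
--                 i += 1
--                 continue
--         else:
--             if ch == "'":
--                 in_single = True
--                 i += 1
--                 continue
--             elif ch == '"':
--                 in_double = True
--                 i += 1
--                 continue
--         if not in_single and not in_double:
--             if i <= len(string) - 4:
--                 if string[i:i + 4] == "True":
--                     lst.append("true")
--                     i += 4
--                     continue
--                 elif string[i:i + 4] == "None":
--                     lst.append("null")
--                     i += 4
--                     continue
--             if i <= len(string) - 5:
--                 if string[i:i + 5] == "False":
--                     lst.append("false")
--                     i += 5
--                     continue
--         lst.append(ch)
--         i += 1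
--     return "".join(lst)
-- ===== SOURCE B (Python) =====
-- def replace_bool_none(string: str):
--     """Segment the input into unquoted runs and quoted runs in one pass; apply
--     whole-segment str.replace to each unquoted run, copy quoted runs verbatim,
--     and drop the quote delimiters."""
--     def subst(s):
--         return s.replace("True", "true").replace("None", "null").replace("False", "false")
--     out = []
--     buf = []
--     i = 0
--     n = len(string)
--     while i < n:
--         ch = string[i]
--         if ch == "'" or ch == '"':
--             out.append(subst("".join(buf)))
--             buf = []
--             i += 1
--             while i < n and string[i] != ch:
--                 out.append(string[i])
--                 i += 1
--             i += 1
--         else: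
--             buf.append(ch)
--             i += 1
--     out.append(subst("".join(buf)))
--     return "".join(out)
-- ===== Notes on version B (the rewrite author's own statement) =====
-- stated objective: faster
-- what changed: A fuses quote tracking with a per-position keyword-prefix scan in Python; B tokenizes the string into unquoted and quoted runs in one pass and applies whole-segment str.replace for the three keywords to each unquoted run, copying quoted runs verbatim.
import Mathlib
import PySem

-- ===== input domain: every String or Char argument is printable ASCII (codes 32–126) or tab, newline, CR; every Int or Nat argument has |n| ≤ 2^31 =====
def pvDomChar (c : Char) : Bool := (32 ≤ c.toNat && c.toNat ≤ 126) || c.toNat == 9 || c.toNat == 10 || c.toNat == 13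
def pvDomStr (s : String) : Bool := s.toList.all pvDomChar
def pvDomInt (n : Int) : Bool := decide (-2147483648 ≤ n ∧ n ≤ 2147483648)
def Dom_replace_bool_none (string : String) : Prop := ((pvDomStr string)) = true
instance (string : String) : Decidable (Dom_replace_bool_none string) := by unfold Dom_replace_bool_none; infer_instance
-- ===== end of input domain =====

-- B replaces A's fused quote-state + per-position keyword scan by a tokenize-then-transform
-- decomposition (segment into runs, whole-segment replace on each unquoted run); same values,
-- measurably faster in Python by a constant factor (bulk str.replace instead of a per-char loop).

-- ===== PORT A =====
-- A's while loop over index i with state (in_single, in_double), ported as the obvious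
-- structural recursion over the remaining characters; the slice tests string[i:i+4] == "True"
-- etc. become take-4 / take-5 tests on the remaining list.
def replace_bool_none_go (sing doub : Bool) : List Char → List Char
  | [] => []
  | c :: rest =>
    if sing then
      if c = '\'' then replace_bool_none_go false doub rest
      else c :: replace_bool_none_go sing doub rest
    else if doub then
      if c = '"' then replace_bool_none_go sing false rest
      else c :: replace_bool_none_go sing doub rest
    else if c = '\'' then replace_bool_none_go true doub rest
    else if c = '"' then replace_bool_none_go sing true rest
    else if (c :: rest).take 4 = ['T', 'r', 'u', 'e'] then
      ['t', 'r', 'u', 'e'] ++ replace_bool_none_go sing doub ((c :: rest).drop 4)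
    else if (c :: rest).take 4 = ['N', 'o', 'n', 'e'] then
      ['n', 'u', 'l', 'l'] ++ replace_bool_none_go sing doub ((c :: rest).drop 4)
    else if (c :: rest).take 5 = ['F', 'a', 'l', 's', 'e'] then
      ['f', 'a', 'l', 's', 'e'] ++ replace_bool_none_go sing doub ((c :: rest).drop 5)
    else c :: replace_bool_none_go sing doub rest
  termination_by l => l.length
  decreasing_by
  all_goals simp

def replace_bool_none (string : String) : String :=
  String.ofList (replace_bool_none_go false false string.toList)

-- ===== PORT B =====
-- subst: the three whole-segment replacements Source B applies to an unquoted run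
def pvSubst (s : List Char) : List Char :=
  PySem.Chars.replace
    (PySem.Chars.replace
      (PySem.Chars.replace s ['T', 'r', 'u', 'e'] ['t', 'r', 'u', 'e'])
      ['N', 'o', 'n', 'e'] ['n', 'u', 'l', 'l'])
    ['F', 'a', 'l', 's', 'e'] ['f', 'a', 'l', 's', 'e']

-- Source B's inner while loop: copy characters until the matching quote, return (copied, remainder)
def pvSpan (q : Char) : List Char → List Char × List Char
  | [] => ([], [])
  | c :: rest =>
    if c = q then ([], rest)
    else
      let p := pvSpan q rest
      (c :: p.1, p.2)

theorem pvSpan_snd_length (q : Char) (l : List Char) : (pvSpan q l).2.length ≤ l.length := by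
  induction l with
  | nil => simp [pvSpan]
  | cons c rest ih =>
    simp only [pvSpan]
    split
    · simp
    · simpa using Nat.le_succ_of_le ih

def replace_bool_none_alt_go : List Char → List Char → List Char
  | [], buf => pvSubst buf
  | c :: rest, buf =>
    if c = '\'' ∨ c = '"' then
      pvSubst buf ++ (pvSpan c rest).1 ++ replace_bool_none_alt_go (pvSpan c rest).2 []
    else replace_bool_none_alt_go rest (buf ++ [c])
  termination_by l _ => l.length
  decreasing_by
  · exact Nat.lt_succ_of_le (pvSpan_snd_length c rest)
  · simp

def replace_bool_none_alt (string : String) : String :=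
  String.ofList (replace_bool_none_alt_go string.toList [])

-- ===== PRECONDITION & SPEC =====
def Spec_replace_bool_none (string : String) (out : String) : Prop := out = replace_bool_none_alt string
instance (string : String) (out : String) : Decidable (Spec_replace_bool_none string out) := by unfold Spec_replace_bool_none; infer_instance

-- ===== CLAIM (what is proved, stated in full; the proofs are below) =====
def Claim_equal_replace_bool_none : Prop := ∀ (string : String), Dom_replace_bool_none string → Spec_replace_bool_none string (replace_bool_none string)

-- ===== LEMMAS AND PROOFS =====

-- A's keyword scan, without the quote logic (proof-side characterisation)
def fScan : List Char → List Char
  | [] => []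
  | c :: rest =>
    if (c :: rest).take 4 = ['T', 'r', 'u', 'e'] then
      ['t', 'r', 'u', 'e'] ++ fScan ((c :: rest).drop 4)
    else if (c :: rest).take 4 = ['N', 'o', 'n', 'e'] then
      ['n', 'u', 'l', 'l'] ++ fScan ((c :: rest).drop 4)
    else if (c :: rest).take 5 = ['F', 'a', 'l', 's', 'e'] then
      ['f', 'a', 'l', 's', 'e'] ++ fScan ((c :: rest).drop 5)
    else c :: fScan rest
  termination_by l => l.length
  decreasing_by
  all_goals simp

-- ---- generic facts about PySem.Chars.replace ----
theorem pvGo_acc (old new : List Char) :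
    ∀ fuel l acc, PySem.Chars.replace.go old new fuel l acc
      = acc.reverse ++ PySem.Chars.replace.go old new fuel l [] := by
  intro fuel
  induction fuel with
  | zero => intro l acc; simp [PySem.Chars.replace.go]
  | succ f ih =>
    intro l acc
    cases l with
    | nil => simp [PySem.Chars.replace.go]
    | cons c t =>
      simp only [PySem.Chars.replace.go]
      split
      · rw [ih (List.drop old.length (c :: t)) (new.reverse ++ acc),
            ih (List.drop old.length (c :: t)) (new.reverse ++ [])]
        simp
      · rw [ih t (c :: acc), ih t [c]]
        simp

theorem pvGo_fuel (o : Char) (os new : List Char) :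
    ∀ f₁ f₂ l, l.length ≤ f₁ → l.length ≤ f₂ →
      PySem.Chars.replace.go (o :: os) new f₁ l [] = PySem.Chars.replace.go (o :: os) new f₂ l [] := by
  intro f₁
  induction f₁ with
  | zero =>
    intro f₂ l h₁ h₂
    have : l = [] := List.length_eq_zero_iff.mp (Nat.le_zero.mp h₁)
    subst this
    cases f₂ <;> simp [PySem.Chars.replace.go]
  | succ f ih =>
    intro f₂ l h₁ h₂
    cases l with
    | nil => cases f₂ <;> simp [PySem.Chars.replace.go]
    | cons c t =>
      cases f₂ with
      | zero => simp at h₂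
      | succ f₂' =>
        simp only [PySem.Chars.replace.go]
        split
        · rename_i hp
          rw [pvGo_acc, pvGo_acc (acc := new.reverse ++ [])]
          have hlen : (List.drop (o :: os).length (c :: t)).length ≤ f := by
            simp at h₁ ⊢
            omega
          have hlen2 : (List.drop (o :: os).length (c :: t)).length ≤ f₂' := by
            simp at h₂ ⊢
            omega
          rw [ih f₂' _ hlen hlen2]
        · rw [pvGo_acc, pvGo_acc (fuel := f₂')]
          have h₁' : t.length ≤ f := by simp at h₁; omega
          have h₂' : t.length ≤ f₂' := by simp at h₂; omega
          rw [ih f₂' t h₁' h₂']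

theorem pvReplace_nil (o : Char) (os new : List Char) :
    PySem.Chars.replace [] (o :: os) new = [] := by
  simp [PySem.Chars.replace, PySem.Chars.replace.go]

theorem pvReplace_cons_not_prefix {o c : Char} {os t new : List Char}
    (h : ¬ (o :: os) <+: (c :: t)) :
    PySem.Chars.replace (c :: t) (o :: os) new = c :: PySem.Chars.replace t (o :: os) new := by
  have hb : (o :: os).isPrefixOf (c :: t) = false := by
    rw [← Bool.not_eq_true, List.isPrefixOf_iff_prefix]
    exact h
  simp only [PySem.Chars.replace, List.isEmpty_cons, Bool.false_eq_true, if_false,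
    List.length_cons, PySem.Chars.replace.go, hb]
  rw [pvGo_acc]
  simp

theorem pvReplace_cons_ne {o c : Char} (os t new : List Char) (h : c ≠ o) :
    PySem.Chars.replace (c :: t) (o :: os) new = c :: PySem.Chars.replace t (o :: os) new := by
  apply pvReplace_cons_not_prefix
  intro hp
  exact h (List.cons_prefix_cons.mp hp).1.symm

theorem pvReplace_prefix {o : Char} {os l new : List Char} (h : (o :: os) <+: l) :
    PySem.Chars.replace l (o :: os) new
      = new ++ PySem.Chars.replace (l.drop (os.length + 1)) (o :: os) new := by
  cases l with
  | nil => exact absurd h.length_le (by simp)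
  | cons c t =>
    have hb : (o :: os).isPrefixOf (c :: t) = true := List.isPrefixOf_iff_prefix.mpr h
    have hlen : os.length + 1 ≤ t.length + 1 := by
      have := h.length_le; simpa using this
    simp only [PySem.Chars.replace, List.isEmpty_cons, Bool.false_eq_true, if_false,
      List.length_cons, PySem.Chars.replace.go, hb, if_true]
    rw [pvGo_acc]
    simp only [List.reverse_reverse, List.append_nil]
    congr 1
    have hd : (List.drop (os.length + 1) (c :: t)).length ≤ t.length := by
      simp
    rw [pvGo_fuel o os new t.length (List.drop (os.length + 1) (c :: t)).length _ hd le_rfl]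

-- shorthand for the three replacements
def repT (w : List Char) : List Char := PySem.Chars.replace w ['T', 'r', 'u', 'e'] ['t', 'r', 'u', 'e']
def repN (w : List Char) : List Char := PySem.Chars.replace w ['N', 'o', 'n', 'e'] ['n', 'u', 'l', 'l']
def repF (w : List Char) : List Char := PySem.Chars.replace w ['F', 'a', 'l', 's', 'e'] ['f', 'a', 'l', 's', 'e']

theorem pvSubst_eq (w : List Char) : pvSubst w = repF (repN (repT w)) := rfl

-- "a non-prefix stays a non-prefix" chains
theorem pe_T (w : List Char) (h : ¬ ['e'] <+: w) : ¬ ['e'] <+: repT w := by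
  cases w with
  | nil => simp [repT, pvReplace_nil]
  | cons c t =>
    by_cases hp : ['T', 'r', 'u', 'e'] <+: (c :: t)
    · simp only [repT, pvReplace_prefix hp]
      simp [List.cons_prefix_cons]
    · simp only [repT, pvReplace_cons_not_prefix hp]
      intro hcon
      rcases List.cons_prefix_cons.mp hcon with ⟨he, _⟩
      exact h (List.cons_prefix_cons.mpr ⟨he, List.nil_prefix⟩)
theorem pne_T (w : List Char) (h : ¬ ['n', 'e'] <+: w) : ¬ ['n', 'e'] <+: repT w := by
  cases w with
  | nil => simp [repT, pvReplace_nil]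
  | cons c t =>
    by_cases hp : ['T', 'r', 'u', 'e'] <+: (c :: t)
    · simp only [repT, pvReplace_prefix hp]
      simp [List.cons_prefix_cons]
    · simp only [repT, pvReplace_cons_not_prefix hp]
      intro hcon
      rcases List.cons_prefix_cons.mp hcon with ⟨he, h2⟩
      exact (pe_T t (fun h3 => h (List.cons_prefix_cons.mpr ⟨he, h3⟩))) h2
theorem pone_T (w : List Char) (h : ¬ ['o', 'n', 'e'] <+: w) : ¬ ['o', 'n', 'e'] <+: repT w := by
  cases w with
  | nil => simp [repT, pvReplace_nil]
  | cons c t =>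
    by_cases hp : ['T', 'r', 'u', 'e'] <+: (c :: t)
    · simp only [repT, pvReplace_prefix hp]
      simp [List.cons_prefix_cons]
    · simp only [repT, pvReplace_cons_not_prefix hp]
      intro hcon
      rcases List.cons_prefix_cons.mp hcon with ⟨he, h2⟩
      exact (pne_T t (fun h3 => h (List.cons_prefix_cons.mpr ⟨he, h3⟩))) h2
theorem pse_T (w : List Char) (h : ¬ ['s', 'e'] <+: w) : ¬ ['s', 'e'] <+: repT w := by
  cases w with
  | nil => simp [repT, pvReplace_nil]
  | cons c t =>
    by_cases hp : ['T', 'r', 'u', 'e'] <+: (c :: t)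
    · simp only [repT, pvReplace_prefix hp]
      simp [List.cons_prefix_cons]
    · simp only [repT, pvReplace_cons_not_prefix hp]
      intro hcon
      rcases List.cons_prefix_cons.mp hcon with ⟨he, h2⟩
      exact (pe_T t (fun h3 => h (List.cons_prefix_cons.mpr ⟨he, h3⟩))) h2
theorem plse_T (w : List Char) (h : ¬ ['l', 's', 'e'] <+: w) : ¬ ['l', 's', 'e'] <+: repT w := by
  cases w with
  | nil => simp [repT, pvReplace_nil]
  | cons c t =>
    by_cases hp : ['T', 'r', 'u', 'e'] <+: (c :: t)
    · simp only [repT, pvReplace_prefix hp]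
      simp [List.cons_prefix_cons]
    · simp only [repT, pvReplace_cons_not_prefix hp]
      intro hcon
      rcases List.cons_prefix_cons.mp hcon with ⟨he, h2⟩
      exact (pse_T t (fun h3 => h (List.cons_prefix_cons.mpr ⟨he, h3⟩))) h2
theorem palse_T (w : List Char) (h : ¬ ['a', 'l', 's', 'e'] <+: w) : ¬ ['a', 'l', 's', 'e'] <+: repT w := by
  cases w with
  | nil => simp [repT, pvReplace_nil]
  | cons c t =>
    by_cases hp : ['T', 'r', 'u', 'e'] <+: (c :: t)
    · simp only [repT, pvReplace_prefix hp]
      simp [List.cons_prefix_cons]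
    · simp only [repT, pvReplace_cons_not_prefix hp]
      intro hcon
      rcases List.cons_prefix_cons.mp hcon with ⟨he, h2⟩
      exact (plse_T t (fun h3 => h (List.cons_prefix_cons.mpr ⟨he, h3⟩))) h2
theorem pe_N (w : List Char) (h : ¬ ['e'] <+: w) : ¬ ['e'] <+: repN w := by
  cases w with
  | nil => simp [repN, pvReplace_nil]
  | cons c t =>
    by_cases hp : ['N', 'o', 'n', 'e'] <+: (c :: t)
    · simp only [repN, pvReplace_prefix hp]
      simp [List.cons_prefix_cons]
    · simp only [repN, pvReplace_cons_not_prefix hp]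
      intro hcon
      rcases List.cons_prefix_cons.mp hcon with ⟨he, _⟩
      exact h (List.cons_prefix_cons.mpr ⟨he, List.nil_prefix⟩)
theorem pse_N (w : List Char) (h : ¬ ['s', 'e'] <+: w) : ¬ ['s', 'e'] <+: repN w := by
  cases w with
  | nil => simp [repN, pvReplace_nil]
  | cons c t =>
    by_cases hp : ['N', 'o', 'n', 'e'] <+: (c :: t)
    · simp only [repN, pvReplace_prefix hp]
      simp [List.cons_prefix_cons]
    · simp only [repN, pvReplace_cons_not_prefix hp]
      intro hcon
      rcases List.cons_prefix_cons.mp hcon with ⟨he, h2⟩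
      exact (pe_N t (fun h3 => h (List.cons_prefix_cons.mpr ⟨he, h3⟩))) h2
theorem plse_N (w : List Char) (h : ¬ ['l', 's', 'e'] <+: w) : ¬ ['l', 's', 'e'] <+: repN w := by
  cases w with
  | nil => simp [repN, pvReplace_nil]
  | cons c t =>
    by_cases hp : ['N', 'o', 'n', 'e'] <+: (c :: t)
    · simp only [repN, pvReplace_prefix hp]
      simp [List.cons_prefix_cons]
    · simp only [repN, pvReplace_cons_not_prefix hp]
      intro hcon
      rcases List.cons_prefix_cons.mp hcon with ⟨he, h2⟩
      exact (pse_N t (fun h3 => h (List.cons_prefix_cons.mpr ⟨he, h3⟩))) h2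
theorem palse_N (w : List Char) (h : ¬ ['a', 'l', 's', 'e'] <+: w) : ¬ ['a', 'l', 's', 'e'] <+: repN w := by
  cases w with
  | nil => simp [repN, pvReplace_nil]
  | cons c t =>
    by_cases hp : ['N', 'o', 'n', 'e'] <+: (c :: t)
    · simp only [repN, pvReplace_prefix hp]
      simp [List.cons_prefix_cons]
    · simp only [repN, pvReplace_cons_not_prefix hp]
      intro hcon
      rcases List.cons_prefix_cons.mp hcon with ⟨he, h2⟩
      exact (plse_N t (fun h3 => h (List.cons_prefix_cons.mpr ⟨he, h3⟩))) h2

-- replace passes over a segment that avoids the pattern's first character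
theorem rep_ne_head (o : Char) (os new : List Char) (pre z : List Char)
    (h : ∀ a ∈ pre, a ≠ o) :
    PySem.Chars.replace (pre ++ z) (o :: os) new = pre ++ PySem.Chars.replace z (o :: os) new := by
  induction pre with
  | nil => simp
  | cons a p ih =>
    have ha : a ≠ o := h a (by simp)
    rw [List.cons_append, pvReplace_cons_ne _ _ _ ha, ih (fun b hb => h b (by simp [hb]))]
    simp

-- the central lemma: A's fused keyword scan = B's three sequential replaces
set_option maxRecDepth 200000 in
theorem fScan_eq_pvSubst_aux : ∀ (n : ℕ) (w : List Char), w.length ≤ n → fScan w = pvSubst w := by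
  intro n
  induction n with
  | zero =>
    intro w hw
    have : w = [] := List.length_eq_zero_iff.mp (Nat.le_zero.mp hw)
    subst this
    simp [fScan, pvSubst, pvReplace_nil]
  | succ n ih =>
    intro w hw
    cases w with
    | nil => simp [fScan, pvSubst, pvReplace_nil]
    | cons c t =>
      by_cases h4T : (c :: t).take 4 = ['T', 'r', 'u', 'e']
      · have hpre : ['T', 'r', 'u', 'e'] <+: c :: t := by
          rw [List.prefix_iff_eq_take]; simpa using h4T.symm
        have h1 : repT (c :: t) = ['t', 'r', 'u', 'e'] ++ repT ((c :: t).drop 4) := by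
          simpa [repT] using pvReplace_prefix (new := ['t', 'r', 'u', 'e']) hpre
        have h2 : pvSubst (c :: t) = ['t', 'r', 'u', 'e'] ++ pvSubst ((c :: t).drop 4) := by
          rw [pvSubst_eq, h1, show (repN (['t','r','u','e'] ++ repT ((c :: t).drop 4)))
              = ['t','r','u','e'] ++ repN (repT ((c :: t).drop 4)) from
            rep_ne_head _ _ _ _ _ (by simp),
            show (repF (['t','r','u','e'] ++ repN (repT ((c :: t).drop 4))))
              = ['t','r','u','e'] ++ repF (repN (repT ((c :: t).drop 4))) from
            rep_ne_head _ _ _ _ _ (by simp)]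
          rfl
        rw [fScan, if_pos h4T, h2, ih ((c :: t).drop 4) (by simp at hw ⊢; omega)]
      · by_cases h4N : (c :: t).take 4 = ['N', 'o', 'n', 'e']
        · have hsplit : c :: t = ['N', 'o', 'n', 'e'] ++ (c :: t).drop 4 := by
            conv_lhs => rw [← List.take_append_drop 4 (c :: t)]
            rw [h4N]
          have h1 : repT (c :: t) = ['N', 'o', 'n', 'e'] ++ repT ((c :: t).drop 4) := by
            conv_lhs => rw [hsplit]
            exact rep_ne_head _ _ _ _ _ (by simp)
          have h2 : repN (['N', 'o', 'n', 'e'] ++ repT ((c :: t).drop 4))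
              = ['n', 'u', 'l', 'l'] ++ repN (repT ((c :: t).drop 4)) := by
            have := pvReplace_prefix (new := ['n', 'u', 'l', 'l'])
              (List.prefix_append ['N', 'o', 'n', 'e'] (repT ((c :: t).drop 4)))
            simpa [repN] using this
          have h3 : pvSubst (c :: t) = ['n', 'u', 'l', 'l'] ++ pvSubst ((c :: t).drop 4) := by
            rw [pvSubst_eq, h1, h2,
              show (repF (['n','u','l','l'] ++ repN (repT ((c :: t).drop 4))))
                = ['n','u','l','l'] ++ repF (repN (repT ((c :: t).drop 4))) from
              rep_ne_head _ _ _ _ _ (by simp)]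
            rfl
          rw [fScan, if_neg h4T, if_pos h4N, h3, ih ((c :: t).drop 4) (by simp at hw ⊢; omega)]
        · by_cases h5F : (c :: t).take 5 = ['F', 'a', 'l', 's', 'e']
          · have hsplit : c :: t = ['F', 'a', 'l', 's', 'e'] ++ (c :: t).drop 5 := by
              conv_lhs => rw [← List.take_append_drop 5 (c :: t)]
              rw [h5F]
            have h1 : repT (c :: t) = ['F', 'a', 'l', 's', 'e'] ++ repT ((c :: t).drop 5) := by
              conv_lhs => rw [hsplit]
              exact rep_ne_head _ _ _ _ _ (by simp)
            have h2 : repN (['F', 'a', 'l', 's', 'e'] ++ repT ((c :: t).drop 5))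
                = ['F', 'a', 'l', 's', 'e'] ++ repN (repT ((c :: t).drop 5)) :=
              rep_ne_head _ _ _ _ _ (by simp)
            have h3 : repF (['F', 'a', 'l', 's', 'e'] ++ repN (repT ((c :: t).drop 5)))
                = ['f', 'a', 'l', 's', 'e'] ++ repF (repN (repT ((c :: t).drop 5))) := by
              have := pvReplace_prefix (new := ['f', 'a', 'l', 's', 'e'])
                (List.prefix_append ['F', 'a', 'l', 's', 'e'] (repN (repT ((c :: t).drop 5))))
              simpa [repF] using this
            have h4 : pvSubst (c :: t) = ['f', 'a', 'l', 's', 'e'] ++ pvSubst ((c :: t).drop 5) := by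
              rw [pvSubst_eq, h1, h2, h3]; rfl
            rw [fScan, if_neg h4T, if_neg h4N, if_pos h5F, h4,
              ih ((c :: t).drop 5) (by simp at hw ⊢; omega)]
          · have hT : ¬ ['T', 'r', 'u', 'e'] <+: c :: t := by
              intro hp; exact h4T (by rw [List.prefix_iff_eq_take] at hp; simpa using hp.symm)
            have hN : ¬ ['N', 'o', 'n', 'e'] <+: c :: t := by
              intro hp; exact h4N (by rw [List.prefix_iff_eq_take] at hp; simpa using hp.symm)
            have hF : ¬ ['F', 'a', 'l', 's', 'e'] <+: c :: t := by
              intro hp; exact h5F (by rw [List.prefix_iff_eq_take] at hp; simpa using hp.symm)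
            have h1 : repT (c :: t) = c :: repT t := pvReplace_cons_not_prefix hT
            have hN2 : ¬ ['N', 'o', 'n', 'e'] <+: c :: repT t := by
              intro hcon
              rcases List.cons_prefix_cons.mp hcon with ⟨heq, h2⟩
              exact pone_T t (fun h3 => hN (List.cons_prefix_cons.mpr ⟨heq, h3⟩)) h2
            have h2 : repN (c :: repT t) = c :: repN (repT t) := pvReplace_cons_not_prefix hN2
            have hF2 : ¬ ['F', 'a', 'l', 's', 'e'] <+: c :: repN (repT t) := by
              intro hcon
              rcases List.cons_prefix_cons.mp hcon with ⟨heq, h3⟩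
              exact palse_N (repT t)
                (palse_T t (fun h4 => hF (List.cons_prefix_cons.mpr ⟨heq, h4⟩))) h3
            have h3 : repF (c :: repN (repT t)) = c :: repF (repN (repT t)) :=
              pvReplace_cons_not_prefix hF2
            have h4 : pvSubst (c :: t) = c :: pvSubst t := by
              rw [pvSubst_eq, h1, h2, h3]; rfl
            rw [fScan, if_neg h4T, if_neg h4N, if_neg h5F, h4,
              ih t (by simp at hw; omega)]

theorem fScan_eq_pvSubst (w : List Char) : fScan w = pvSubst w :=
  fScan_eq_pvSubst_aux w.length w le_rfl

-- tail is empty or starts with a quote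
def okTail (t : List Char) : Prop := t = [] ∨ ∃ q t', t = q :: t' ∧ (q = '\'' ∨ q = '"')

theorem take_kw (r t K : List Char) (k : ℕ) (hk : K.length = k) (hK : ∀ a ∈ K, a ≠ '\'' ∧ a ≠ '"')
    (ht : okTail t) : (r ++ t).take k = K ↔ r.take k = K := by
  constructor
  · intro h
    by_cases hlen : k ≤ r.length
    · rwa [List.take_append_of_le_length hlen] at h
    · exfalso
      push Not at hlen
      rcases ht with rfl | ⟨q, t', rfl, hq⟩
      · rw [List.append_nil] at h
        have := congrArg List.length h
        simp [hk] at this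
        omega
      · have hqK : q ∈ K := by
          rw [← h, List.take_append,
            List.take_of_length_le (Nat.le_of_lt hlen)]
          have h1 : 1 ≤ k - r.length := by omega
          obtain ⟨m, hm⟩ : ∃ m, k - r.length = m + 1 := ⟨k - r.length - 1, by omega⟩
          rw [hm]
          simp
        rcases hK q hqK with ⟨h1, h2⟩
        rcases hq with rfl | rfl
        · exact h1 rfl
        · exact h2 rfl
  · intro h
    have hlen : k ≤ r.length := by
      have := congrArg List.length h
      simp [hk] at this
      omega
    rwa [List.take_append_of_le_length hlen]

set_option maxRecDepth 200000 in
theorem goA_run_aux : ∀ (n : ℕ) (r t : List Char), r.length ≤ n →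
    (∀ c ∈ r, c ≠ '\'' ∧ c ≠ '"') → okTail t →
    replace_bool_none_go false false (r ++ t) = fScan r ++ replace_bool_none_go false false t := by
  intro n
  induction n with
  | zero =>
    intro r t hn _ _
    have : r = [] := List.length_eq_zero_iff.mp (Nat.le_zero.mp hn)
    subst this
    simp [fScan]
  | succ n ih =>
    intro r t hn hr ht
    cases r with
    | nil => simp [fScan]
    | cons c r' =>
      have hc := hr c (by simp)
      rw [List.cons_append, replace_bool_none_go, fScan]
      simp only [Bool.false_eq_true, if_false, if_neg hc.1, if_neg hc.2]
      by_cases hT : (c :: r').take 4 = ['T', 'r', 'u', 'e']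
      · have hT' : (c :: (r' ++ t)).take 4 = ['T', 'r', 'u', 'e'] := by
          rw [← List.cons_append]
          exact (take_kw (c :: r') t _ 4 rfl (by simp) ht).mpr hT
        have hge : 4 ≤ (c :: r').length := by
          have := congrArg List.length hT
          simp only [List.length_take, List.length_cons] at this
          simp only [List.length_cons]
          omega
        rw [if_pos hT', if_pos hT, ← List.cons_append,
          List.drop_append_of_le_length hge,
          ih ((c :: r').drop 4) t (by simp only [List.length_drop, List.length_cons] at hn hge ⊢; omega)
            (fun a ha => hr a (List.mem_of_mem_drop ha)) ht,
          List.append_assoc]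
      · have hT' : ¬ (c :: (r' ++ t)).take 4 = ['T', 'r', 'u', 'e'] := fun hcon =>
          hT ((take_kw (c :: r') t _ 4 rfl (by simp) ht).mp (by rwa [List.cons_append]))
        rw [if_neg hT', if_neg hT]
        by_cases hN : (c :: r').take 4 = ['N', 'o', 'n', 'e']
        · have hN' : (c :: (r' ++ t)).take 4 = ['N', 'o', 'n', 'e'] := by
            rw [← List.cons_append]
            exact (take_kw (c :: r') t _ 4 rfl (by simp) ht).mpr hN
          have hge : 4 ≤ (c :: r').length := by
            have := congrArg List.length hN
            simp only [List.length_take, List.length_cons] at this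
            simp only [List.length_cons]
            omega
          rw [if_pos hN', if_pos hN, ← List.cons_append,
            List.drop_append_of_le_length hge,
            ih ((c :: r').drop 4) t (by simp only [List.length_drop, List.length_cons] at hn hge ⊢; omega)
              (fun a ha => hr a (List.mem_of_mem_drop ha)) ht,
            List.append_assoc]
        · have hN' : ¬ (c :: (r' ++ t)).take 4 = ['N', 'o', 'n', 'e'] := fun hcon =>
            hN ((take_kw (c :: r') t _ 4 rfl (by simp) ht).mp (by rwa [List.cons_append]))
          rw [if_neg hN', if_neg hN]
          by_cases hF : (c :: r').take 5 = ['F', 'a', 'l', 's', 'e']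
          · have hF' : (c :: (r' ++ t)).take 5 = ['F', 'a', 'l', 's', 'e'] := by
              rw [← List.cons_append]
              exact (take_kw (c :: r') t _ 5 rfl (by simp) ht).mpr hF
            have hge : 5 ≤ (c :: r').length := by
              have := congrArg List.length hF
              simp only [List.length_take, List.length_cons] at this
              simp only [List.length_cons]
              omega
            rw [if_pos hF', if_pos hF, ← List.cons_append,
              List.drop_append_of_le_length hge,
              ih ((c :: r').drop 5) t (by simp only [List.length_drop, List.length_cons] at hn hge ⊢; omega)
                (fun a ha => hr a (List.mem_of_mem_drop ha)) ht,
              List.append_assoc]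
          · have hF' : ¬ (c :: (r' ++ t)).take 5 = ['F', 'a', 'l', 's', 'e'] := fun hcon =>
              hF ((take_kw (c :: r') t _ 5 rfl (by simp) ht).mp (by rwa [List.cons_append]))
            rw [if_neg hF', if_neg hF,
              ih r' t (by simp at hn; omega) (fun a ha => hr a (by simp [ha])) ht]
            simp

theorem goA_run (r t : List Char) (hr : ∀ c ∈ r, c ≠ '\'' ∧ c ≠ '"') (ht : okTail t) :
    replace_bool_none_go false false (r ++ t) = fScan r ++ replace_bool_none_go false false t :=
  goA_run_aux r.length r t le_rfl hr ht

theorem spanA_single (l : List Char) :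
    replace_bool_none_go true false l
      = (pvSpan '\'' l).1 ++ replace_bool_none_go false false (pvSpan '\'' l).2 := by
  induction l with
  | nil => simp [replace_bool_none_go, pvSpan]
  | cons c rest ih =>
    rw [replace_bool_none_go]
    simp only [pvSpan, if_true]
    by_cases hc : c = '\''
    · simp [hc]
    · simp only [if_neg hc, ih]
      simp

theorem spanA_double (l : List Char) :
    replace_bool_none_go false true l
      = (pvSpan '"' l).1 ++ replace_bool_none_go false false (pvSpan '"' l).2 := by
  induction l with
  | nil => simp [replace_bool_none_go, pvSpan]
  | cons c rest ih =>
    rw [replace_bool_none_go]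
    simp only [pvSpan, Bool.false_eq_true, if_false, if_true]
    by_cases hc : c = '"'
    · simp [hc]
    · simp only [if_neg hc, ih]
      simp

theorem altB_run (r : List Char) (hr : ∀ c ∈ r, c ≠ '\'' ∧ c ≠ '"') :
    ∀ t buf, replace_bool_none_alt_go (r ++ t) buf = replace_bool_none_alt_go t (buf ++ r) := by
  induction r with
  | nil => simp
  | cons c r' ih =>
    intro t buf
    have hc := hr c (by simp)
    rw [List.cons_append, replace_bool_none_alt_go,
      if_neg (by simp [hc.1, hc.2]),
      ih (fun a ha => hr a (by simp [ha])) t (buf ++ [c])]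
    simp

-- split off the leading unquoted run
def runSplit : List Char → List Char × List Char
  | [] => ([], [])
  | c :: t =>
    if c = '\'' ∨ c = '"' then ([], c :: t)
    else
      let p := runSplit t
      (c :: p.1, p.2)

theorem runSplit_append (l : List Char) : l = (runSplit l).1 ++ (runSplit l).2 := by
  induction l with
  | nil => simp [runSplit]
  | cons c t ih =>
    simp only [runSplit]
    split
    · simp
    · simpa using ih

theorem runSplit_mem (l : List Char) : ∀ c ∈ (runSplit l).1, c ≠ '\'' ∧ c ≠ '"' := by
  induction l with
  | nil => simp [runSplit]
  | cons c t ih =>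
    simp only [runSplit]
    split
    · simp
    · rename_i hq
      intro a ha
      simp only [List.mem_cons] at ha
      rcases ha with rfl | ha
      · exact ⟨fun h => hq (Or.inl h), fun h => hq (Or.inr h)⟩
      · exact ih a ha

theorem runSplit_okTail (l : List Char) : okTail (runSplit l).2 := by
  induction l with
  | nil => simp [runSplit, okTail]
  | cons c t ih =>
    simp only [runSplit]
    split
    · exact Or.inr ⟨c, t, rfl, by assumption⟩
    · exact ih

theorem main_eq_aux : ∀ (n : ℕ) (l : List Char), l.length ≤ n →
    replace_bool_none_go false false l = replace_bool_none_alt_go l [] := by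
  intro n
  induction n with
  | zero =>
    intro l hn
    have : l = [] := List.length_eq_zero_iff.mp (Nat.le_zero.mp hn)
    subst this
    simp [replace_bool_none_go, replace_bool_none_alt_go, pvSubst, pvReplace_nil]
  | succ n ih =>
    intro l hn
    obtain ⟨r, t, hrt, hr, ht⟩ :
        ∃ r t, l = r ++ t ∧ (∀ c ∈ r, c ≠ '\'' ∧ c ≠ '"') ∧ okTail t :=
      ⟨(runSplit l).1, (runSplit l).2, runSplit_append l, runSplit_mem l, runSplit_okTail l⟩
    subst hrt
    rcases ht with rfl | ⟨q, t', rfl, hq⟩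
    · rw [goA_run r [] hr (Or.inl rfl), altB_run r hr [] []]
      simp only [List.nil_append]
      rw [show replace_bool_none_go false false [] = [] from by
          simp [replace_bool_none_go],
        show replace_bool_none_alt_go [] r = pvSubst r from by
          simp [replace_bool_none_alt_go],
        fScan_eq_pvSubst]
      simp
    · have hlen2 : (pvSpan q t').2.length ≤ n := by
        have h1 := pvSpan_snd_length q t'
        have : t'.length < (r ++ q :: t').length := by
          simp only [List.length_append, List.length_cons]
          omega
        omega
      have hrec := ih (pvSpan q t').2 hlen2
      rw [goA_run r (q :: t') hr (Or.inr ⟨q, t', rfl, hq⟩),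
        altB_run r hr (q :: t') []]
      rw [show replace_bool_none_alt_go (q :: t') ([] ++ r)
          = pvSubst ([] ++ r) ++ (pvSpan q t').1 ++ replace_bool_none_alt_go (pvSpan q t').2 []
        from by rw [replace_bool_none_alt_go, if_pos hq]]
      have hgoq : replace_bool_none_go false false (q :: t')
          = (pvSpan q t').1 ++ replace_bool_none_go false false (pvSpan q t').2 := by
        rcases hq with rfl | rfl
        · rw [replace_bool_none_go]
          simp only [Bool.false_eq_true, if_false]
          exact spanA_single t'
        · rw [replace_bool_none_go]
          simp only [Bool.false_eq_true, if_false, if_neg (by decide : ¬ ('"' : Char) = '\'')]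
          exact spanA_double t'
      rw [hgoq, hrec, fScan_eq_pvSubst]
      simp [List.append_assoc]

theorem main_eq (l : List Char) :
    replace_bool_none_go false false l = replace_bool_none_alt_go l [] :=
  main_eq_aux l.length l le_rfl

-- ===== VERDICT (by name: the statement is the Claim_ definition above) =====
theorem replace_bool_none_spec : Claim_equal_replace_bool_none := by
  intro s _
  unfold Spec_replace_bool_none replace_bool_none replace_bool_none_alt
  exact congrArg String.ofList (main_eq s.toList)
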